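-- pv_equiv track=rewrite | github.com/zero91/jpyutils | mltools/utils/tags.py | is_valid_iobes
-- ===== SOURCE A (Python) =====
-- def is_valid_iobes(tags):
--     """Judge whether `tags' is a valid IOBES string.
--
--     Parameters
--     ----------
--     tags: list
--         List of tags.
--
--     Returns
--     -------
--     is_valid: boolean
--         True if `tags' is in valid IOBES format, otherwise False.
--
--     """
--     for i, tag in enumerate(tags):
--         if tag == 'O':
--             continue
--         fields = tag.split('-')
--         if len(fields) != 2 or fields[0] not in ['B', 'I', 'E', 'S']:
--             return False
--
--         pos, tag_name = fields
--         if pos in ['B', 'I'] and (i + 1 == len(tags) \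
--                 or tags[i + 1].split('-') not in [['I', tag_name], ['E', tag_name]]):
--             return False
--
--         if pos in ['I', 'E'] and \
--                 (i == 0 or tags[i - 1].split('-') not in [['B', tag_name], ['I', tag_name]]):
--             return False
--     return True
-- ===== SOURCE B (Python) =====
-- def is_valid_iobes(tags):
--     """Single left-to-right scan keeping the name of the currently open entity."""
--     open_name = None
--     for tag in tags:
--         if tag == 'O':
--             if open_name is not None:
--                 return False
--             continue
--         fields = tag.split('-')
--         if len(fields) != 2 or fields[0] not in ('B', 'I', 'E', 'S'):
--             return False
--         pos, name = fields
--         if open_name is not None: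
--             if pos not in ('I', 'E') or name != open_name:
--                 return False
--         elif pos in ('I', 'E'):
--             return False
--         open_name = name if pos in ('B', 'I') else None
--     return open_name is None
-- ===== Notes on version B (the rewrite author's own statement) =====
-- stated objective: simpler
-- what changed: Replaced A's per-tag neighbour look-ups (tags[i+1]/tags[i-1] with index bookkeeping) by a single left-to-right scan that maintains one state variable, the name of the currently open entity.
import Mathlib
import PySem

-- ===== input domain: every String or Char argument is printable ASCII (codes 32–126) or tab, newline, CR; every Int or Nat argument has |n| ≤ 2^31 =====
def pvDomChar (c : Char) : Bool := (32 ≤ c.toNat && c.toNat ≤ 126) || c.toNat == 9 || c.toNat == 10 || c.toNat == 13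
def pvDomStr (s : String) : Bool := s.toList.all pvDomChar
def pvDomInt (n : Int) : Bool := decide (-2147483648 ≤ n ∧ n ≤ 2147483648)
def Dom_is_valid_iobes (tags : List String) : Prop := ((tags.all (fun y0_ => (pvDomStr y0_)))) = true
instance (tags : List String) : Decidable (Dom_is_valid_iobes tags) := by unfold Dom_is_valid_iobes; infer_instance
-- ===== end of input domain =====

-- B replaces A's per-tag neighbour look-ups (tags[i+1]/tags[i-1]) by a single scan keeping
-- one open-entity state variable; objective: simpler.

-- ===== PORT A =====
-- s.split(sep) for nonempty sep: split? is `some` whenever sep ≠ "", so getD is exact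
def pySplit (s sep : String) : List String := (PySem.Str.split? s sep).getD []

-- `for i, tag in enumerate(tags)` ported as structural recursion carrying the index i;
-- tags[i+1] / tags[i-1] are ported with List.getD: the Python code only reads them after
-- guarding i+1 != len(tags) (resp. i != 0), so the index is always in range and getD is exact.
def aGo (tags : List String) (i : Nat) : List String → Bool
  | [] => true
  | tag :: rest =>
    if tag = "O" then aGo tags (i + 1) rest
    else
      let fields := pySplit tag "-"
      if fields.length ≠ 2 ∨ fields.getD 0 "" ∉ (["B", "I", "E", "S"] : List String) then
        false
      else
        -- pos, tag_name = fields (fields has exactly 2 elements here)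
        let pos := fields.getD 0 ""
        let tag_name := fields.getD 1 ""
        if pos ∈ (["B", "I"] : List String) ∧
            (i + 1 = tags.length ∨
              pySplit (tags.getD (i + 1) "") "-" ∉
                ([["I", tag_name], ["E", tag_name]] : List (List String))) then
          false
        else if pos ∈ (["I", "E"] : List String) ∧
            (i = 0 ∨
              pySplit (tags.getD (i - 1) "") "-" ∉
                ([["B", tag_name], ["I", tag_name]] : List (List String))) then
          false
        else aGo tags (i + 1) rest

def is_valid_iobes (tags : List String) : Bool := aGo tags 0 tags

-- ===== PORT B =====
-- single left-to-right pass; openName is the name of the entity awaiting continuation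
def bGo (openName : Option String) : List String → Bool
  | [] => openName.isNone
  | tag :: rest =>
    if tag = "O" then
      match openName with
      | some _ => false
      | none => bGo none rest
    else
      let fields := pySplit tag "-"
      if fields.length ≠ 2 ∨ fields.getD 0 "" ∉ (["B", "I", "E", "S"] : List String) then
        false
      else
        let pos := fields.getD 0 ""
        let name := fields.getD 1 ""
        match openName with
        | some o =>
          if pos ∉ (["I", "E"] : List String) ∨ name ≠ o then false
          else bGo (if pos ∈ (["B", "I"] : List String) then some name else none) rest
        | none =>
          if pos ∈ (["I", "E"] : List String) then false
          else bGo (if pos ∈ (["B", "I"] : List String) then some name else none) rest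

def is_valid_iobes_alt (tags : List String) : Bool := bGo none tags

-- ===== PRECONDITION & SPEC =====
def Spec_is_valid_iobes (tags : List String) (out : Bool) : Prop := out = is_valid_iobes_alt tags
instance (tags : List String) (out : Bool) : Decidable (Spec_is_valid_iobes tags out) := by unfold Spec_is_valid_iobes; infer_instance

-- ===== CLAIM (what is proved, stated in full; the proofs are below) =====
def Claim_equal_is_valid_iobes : Prop := ∀ (tags : List String), Dom_is_valid_iobes tags → Spec_is_valid_iobes tags (is_valid_iobes tags)

-- ===== LEMMAS AND PROOFS =====

theorem pair_mem_pairs {a b x y u v : String}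
    (h : ([a, b] : List String) ∈ ([[x, y], [u, v]] : List (List String))) :
    (a = x ∧ b = y) ∨ (a = u ∧ b = v) := by simpa using h

theorem pair_mem_pairs' {a b x y u v : String} (h : (a = x ∧ b = y) ∨ (a = u ∧ b = v)) :
    ([a, b] : List String) ∈ ([[x, y], [u, v]] : List (List String)) := by
  rcases h with ⟨rfl, rfl⟩ | ⟨rfl, rfl⟩ <;> simp

-- when an entity o is open and the next tag does not continue it, B rejects
theorem bGo_open_mismatch (o t : String) (r : List String)
    (h : pySplit t "-" ∉ ([["I", o], ["E", o]] : List (List String))) :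
    bGo (some o) (t :: r) = false := by
  by_cases hO : t = "O"
  · simp [bGo, hO]
  · simp only [bGo, if_neg hO]
    by_cases hfmt : (pySplit t "-").length ≠ 2 ∨
        (pySplit t "-").getD 0 "" ∉ (["B", "I", "E", "S"] : List String)
    · rw [if_pos hfmt]
    · rw [if_neg hfmt]
      push_neg at hfmt
      obtain ⟨a, b, hab⟩ := List.length_eq_two.mp hfmt.1
      rw [hab] at h
      simp only [hab]
      rw [if_pos]
      by_contra hcon
      simp only [not_or, not_not, ne_eq, Decidable.not_not] at hcon
      obtain ⟨hIE, hbo⟩ := hcon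
      simp only [List.getD_cons_zero, List.getD_cons_succ] at hIE hbo
      exact h (pair_mem_pairs' (by rcases (by simpa using hIE : a = "I" ∨ a = "E") with rfl | rfl
                                   · exact Or.inl ⟨rfl, hbo⟩
                                   · exact Or.inr ⟨rfl, hbo⟩))

theorem key (tags : List String) :
    ∀ (l : List String) (i : Nat) (s : Option String), tags.drop i = l →
      (∀ n, s = some n →
        0 < i ∧
        pySplit (tags.getD (i - 1) "") "-" ∈
          ([["B", n], ["I", n]] : List (List String)) ∧
        ∃ t r, l = t :: r ∧
          pySplit t "-" ∈ ([["I", n], ["E", n]] : List (List String))) →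
      (s = none →
        i = 0 ∨ ∀ n, pySplit (tags.getD (i - 1) "") "-" ∉
          ([["B", n], ["I", n]] : List (List String))) →
      aGo tags i l = bGo s l := by
  intro l
  induction l with
  | nil =>
    intro i s hdrop hsome hnone
    cases s with
    | none => simp [aGo, bGo]
    | some n =>
      obtain ⟨-, -, t, r, h, -⟩ := hsome n rfl
      exact absurd h (by simp)
  | cons t r ih =>
    intro i s hdrop hsome hnone
    have hgetq : tags[i]? = some t := by
      have h0 : (tags.drop i)[0]? = some t := by rw [hdrop]; rfl
      simpa using h0
    have hlen : i < tags.length := (List.getElem?_eq_some_iff.mp hgetq).1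
    have hget : tags.getD i "" = t := by simp [List.getD, hgetq]
    have hdrop1 : tags.drop (i + 1) = r := by
      have h1 : tags.drop (i + 1) = (tags.drop i).drop 1 := by rw [List.drop_drop]
      rw [h1, hdrop]; rfl
    have hOsplit : pySplit "O" "-" = ["O"] := by decide
    by_cases hO : t = "O"
    · subst hO
      cases s with
      | some n =>
        obtain ⟨-, -, t', r', heq, hshape⟩ := hsome n rfl
        rw [List.cons.injEq] at heq
        rw [← heq.1, hOsplit] at hshape
        simp at hshape
      | none =>
        rw [show aGo tags i ("O" :: r) = aGo tags (i + 1) r from by simp [aGo],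
            show bGo none ("O" :: r) = bGo none r from by simp [bGo]]
        refine ih (i + 1) none hdrop1 (by simp) fun _ => Or.inr fun n => ?_
        simp only [Nat.add_sub_cancel]
        rw [hget, hOsplit]
        simp
    · -- t ≠ "O"
      by_cases hfmt : (pySplit t "-").length ≠ 2 ∨
          (pySplit t "-").getD 0 "" ∉ (["B", "I", "E", "S"] : List String)
      · -- bad format: both reject
        have ha : aGo tags i (t :: r) = false := by
          simp only [aGo, if_neg hO]; rw [if_pos hfmt]
        have hb : bGo s (t :: r) = false := by
          cases s <;> · simp only [bGo, if_neg hO]; rw [if_pos hfmt]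
        rw [ha, hb]
      · push_neg at hfmt
        obtain ⟨a, b, hab⟩ := List.length_eq_two.mp hfmt.1
        have hmem := hfmt.2
        rw [hab] at hmem
        simp only [List.getD_cons_zero] at hmem
        have hfmtn : ¬((pySplit t "-").length ≠ 2 ∨
            (pySplit t "-").getD 0 "" ∉ (["B", "I", "E", "S"] : List String)) := by
          push_neg; exact hfmt
        -- one step of aGo with fields = [a, b]
        have haGo : aGo tags i (t :: r) =
            (if a ∈ (["B", "I"] : List String) ∧
                (i + 1 = tags.length ∨
                  pySplit (tags.getD (i + 1) "") "-" ∉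
                    ([["I", b], ["E", b]] : List (List String))) then
              false
            else if a ∈ (["I", "E"] : List String) ∧
                (i = 0 ∨
                  pySplit (tags.getD (i - 1) "") "-" ∉
                    ([["B", b], ["I", b]] : List (List String))) then
              false
            else aGo tags (i + 1) r) := by
          simp only [aGo, if_neg hO]
          rw [if_neg hfmtn]
          simp only [hab, List.getD_cons_zero, List.getD_cons_succ]
        -- end-of-list index fact, used when r = []
        have hend : r = [] → i + 1 = tags.length := by
          intro hr
          rw [hr] at hdrop1
          rw [List.drop_eq_nil_iff] at hdrop1
          omega
        -- next-element facts, used when r = t2 :: r2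
        have hnext : ∀ t2 r2, r = t2 :: r2 →
            tags.getD (i + 1) "" = t2 ∧ i + 1 < tags.length := by
          intro t2 r2 hr
          rw [hr] at hdrop1
          have h0 : (tags.drop (i + 1))[0]? = some t2 := by rw [hdrop1]; rfl
          simp only [List.getElem?_drop] at h0
          exact ⟨by simp [List.getD, h0], (List.getElem?_eq_some_iff.mp h0).1⟩
        cases s with
        | some o =>
          obtain ⟨hipos, hprev, t', r', heq, hshape⟩ := hsome o rfl
          rw [List.cons.injEq] at heq
          rw [← heq.1, hab] at hshape
          have hsplit2 := pair_mem_pairs hshape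
          have hbo : b = o := by rcases hsplit2 with ⟨-, h2⟩ | ⟨-, h2⟩ <;> exact h2
          subst hbo
          have haIE : a = "I" ∨ a = "E" := by
            rcases hsplit2 with ⟨h2, -⟩ | ⟨h2, -⟩
            · exact Or.inl h2
            · exact Or.inr h2
          have hbGo : bGo (some b) (t :: r) =
              bGo (if a ∈ (["B", "I"] : List String) then some b else none) r := by
            simp only [bGo, if_neg hO]
            rw [if_neg hfmtn]
            simp only [hab, List.getD_cons_zero, List.getD_cons_succ]
            rw [if_neg (by rcases haIE with rfl | rfl <;> simp)]
          have hcond2false : ¬(a ∈ (["I", "E"] : List String) ∧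
              (i = 0 ∨ pySplit (tags.getD (i - 1) "") "-" ∉
                ([["B", b], ["I", b]] : List (List String)))) := by
            rintro ⟨-, hi0 | hnm⟩
            · omega
            · exact hnm hprev
          rcases haIE with rfl | rfl
          · -- a = "I": A's forward check
            rw [haGo, hbGo,
              if_pos (show ("I" : String) ∈ (["B", "I"] : List String) by decide)]
            cases r with
            | nil =>
              rw [if_pos ⟨by decide, Or.inl (hend rfl)⟩]
              simp [bGo]
            | cons t2 r2 =>
              obtain ⟨hn2, hlt2⟩ := hnext t2 r2 rfl
              by_cases hsh : pySplit t2 "-" ∈ ([["I", b], ["E", b]] : List (List String))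
              · rw [if_neg (by rw [hn2]; push_neg; intro _; exact ⟨by omega, hsh⟩),
                  if_neg hcond2false]
                refine ih (i + 1) (some b) hdrop1 ?_ (by simp)
                rintro n hn
                rw [Option.some.injEq] at hn
                subst hn
                refine ⟨by omega, ?_, t2, r2, rfl, hsh⟩
                simp only [Nat.add_sub_cancel]
                rw [hget, hab]
                exact pair_mem_pairs' (Or.inr ⟨rfl, rfl⟩)
              · rw [if_pos ⟨by decide, Or.inr (by rw [hn2]; exact hsh)⟩]
                exact (bGo_open_mismatch b t2 r2 hsh).symm
          · -- a = "E": entity closes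
            rw [haGo, hbGo,
              if_neg (by rintro ⟨hc, -⟩; exact absurd hc (by decide)),
              if_neg hcond2false,
              if_neg (show ¬ ("E" : String) ∈ (["B", "I"] : List String) by decide)]
            refine ih (i + 1) none hdrop1 (by simp) fun _ => Or.inr fun n => ?_
            simp only [Nat.add_sub_cancel]
            rw [hget, hab]
            intro hc
            rcases pair_mem_pairs hc with ⟨hc1, -⟩ | ⟨hc1, -⟩ <;> simp at hc1
        | none =>
          have hn := hnone rfl
          have hbGo : bGo none (t :: r) =
              (if a ∈ (["I", "E"] : List String) then false
               else bGo (if a ∈ (["B", "I"] : List String) then some b else none) r) := by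
            simp only [bGo, if_neg hO]
            rw [if_neg hfmtn]
            simp only [hab, List.getD_cons_zero, List.getD_cons_succ]
          have hback : a ∈ (["I", "E"] : List String) →
              (a ∈ (["I", "E"] : List String) ∧
                (i = 0 ∨ pySplit (tags.getD (i - 1) "") "-" ∉
                  ([["B", b], ["I", b]] : List (List String)))) := by
            intro hmem2
            refine ⟨hmem2, ?_⟩
            rcases hn with h0 | hall
            · exact Or.inl h0
            · exact Or.inr (hall b)
          rcases (by simpa using hmem : a = "B" ∨ a = "I" ∨ a = "E" ∨ a = "S") with
            rfl | rfl | rfl | rfl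
          · -- a = "B": opens an entity; A's forward check
            rw [haGo, hbGo,
              if_neg (show ¬ ("B" : String) ∈ (["I", "E"] : List String) by decide),
              if_pos (show ("B" : String) ∈ (["B", "I"] : List String) by decide)]
            cases r with
            | nil =>
              rw [if_pos ⟨by decide, Or.inl (hend rfl)⟩]
              simp [bGo]
            | cons t2 r2 =>
              obtain ⟨hn2, hlt2⟩ := hnext t2 r2 rfl
              by_cases hsh : pySplit t2 "-" ∈ ([["I", b], ["E", b]] : List (List String))
              · rw [if_neg (by rw [hn2]; push_neg; intro _; exact ⟨by omega, hsh⟩),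
                  if_neg (by rintro ⟨hc, -⟩; exact absurd hc (by decide))]
                refine ih (i + 1) (some b) hdrop1 ?_ (by simp)
                rintro n hn'
                rw [Option.some.injEq] at hn'
                subst hn'
                refine ⟨by omega, ?_, t2, r2, rfl, hsh⟩
                simp only [Nat.add_sub_cancel]
                rw [hget, hab]
                exact pair_mem_pairs' (Or.inl ⟨rfl, rfl⟩)
              · rw [if_pos ⟨by decide, Or.inr (by rw [hn2]; exact hsh)⟩]
                exact (bGo_open_mismatch b t2 r2 hsh).symm
          · -- a = "I" with nothing open: both reject
            rw [haGo, hbGo, if_pos (show ("I" : String) ∈ (["I", "E"] : List String) by decide)]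
            by_cases hc1 : ("I" : String) ∈ (["B", "I"] : List String) ∧
                (i + 1 = tags.length ∨
                  pySplit (tags.getD (i + 1) "") "-" ∉
                    ([["I", b], ["E", b]] : List (List String)))
            · rw [if_pos hc1]
            · rw [if_neg hc1, if_pos (hback (by decide))]
          · -- a = "E" with nothing open: both reject
            rw [haGo, hbGo, if_pos (show ("E" : String) ∈ (["I", "E"] : List String) by decide),
              if_neg (by rintro ⟨hc, -⟩; exact absurd hc (by decide)),
              if_pos (hback (by decide))]
          · -- a = "S": single-tag entity
            rw [haGo, hbGo,
              if_neg (show ¬ ("S" : String) ∈ (["I", "E"] : List String) by decide),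
              if_neg (by rintro ⟨hc, -⟩; exact absurd hc (by decide)),
              if_neg (by rintro ⟨hc, -⟩; exact absurd hc (by decide)),
              if_neg (show ¬ ("S" : String) ∈ (["B", "I"] : List String) by decide)]
            refine ih (i + 1) none hdrop1 (by simp) fun _ => Or.inr fun n => ?_
            simp only [Nat.add_sub_cancel]
            rw [hget, hab]
            intro hc
            rcases pair_mem_pairs hc with ⟨hc1, -⟩ | ⟨hc1, -⟩ <;> simp at hc1

-- ===== VERDICT (by name: the statement is the Claim_ definition above) =====
theorem is_valid_iobes_spec : Claim_equal_is_valid_iobes := by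
  intro tags _
  show is_valid_iobes tags = is_valid_iobes_alt tags
  exact key tags tags 0 none (by simp) (by simp) (fun _ => Or.inl rfl)
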